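-- pv_equiv track=rewrite | github.com/AlertBear/ovirt-manager-auto | art/tests/integration/snmp_traps/__init__.py | generate_helper
-- ===== SOURCE A (Python) =====
-- def generate_helper(configurations, helper=dict()):
--     """
--     Description:
--         Generates helper dictionary to store configuration files paths.
--     Args:
--         configurations (list[str]): list of configurations
--         helper (dict[str]): helper dictionary
--     """
--     configuration = configurations[0]
--
--     if configuration == "snmptrapd":
--         helper[configuration] = "/etc/snmp/snmptrapd.conf"
--     elif configuration == "snmptrapd_users":
--         helper[configuration] = "/var/lib/net-snmp/snmptrapd.conf"
--     elif configuration == "ovirt_notifier":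
--         helper[configuration] = (
--             "/etc/ovirt-engine/notifier/notifier.conf.d/99-snmp.conf"
--         )
--     elif configuration == "snmpd":
--         helper[configuration] = "/etc/snmp/snmpd.conf"
--     else:
--         raise NotImplementedError(
--             "There's no implementation for this configuration."
--         )
--     if len(configurations) > 1:
--         return generate_helper(configurations[1:], helper)
--     else:
--         return helper
-- ===== SOURCE B (Python) =====
-- _PATHS = {
--     "snmptrapd": "/etc/snmp/snmptrapd.conf",
--     "snmptrapd_users": "/var/lib/net-snmp/snmptrapd.conf",
--     "ovirt_notifier": "/etc/ovirt-engine/notifier/notifier.conf.d/99-snmp.conf",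
--     "snmpd": "/etc/snmp/snmpd.conf",
-- }
--
--
-- def generate_helper(configurations, helper=dict()):
--     """Fill helper with the config-file path of every listed configuration."""
--     for configuration in configurations:
--         if configuration not in _PATHS:
--             raise NotImplementedError(
--                 "There's no implementation for this configuration."
--             )
--         helper[configuration] = _PATHS[configuration]
--     return helper
-- ===== Notes on version B (the rewrite author's own statement) =====
-- stated objective: simpler
-- what changed: Replaces the tail-recursive slice-per-step walk over configurations with a single iterative loop driven by one literal name-to-path mapping instead of an if/elif chain.
import Mathlib
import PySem

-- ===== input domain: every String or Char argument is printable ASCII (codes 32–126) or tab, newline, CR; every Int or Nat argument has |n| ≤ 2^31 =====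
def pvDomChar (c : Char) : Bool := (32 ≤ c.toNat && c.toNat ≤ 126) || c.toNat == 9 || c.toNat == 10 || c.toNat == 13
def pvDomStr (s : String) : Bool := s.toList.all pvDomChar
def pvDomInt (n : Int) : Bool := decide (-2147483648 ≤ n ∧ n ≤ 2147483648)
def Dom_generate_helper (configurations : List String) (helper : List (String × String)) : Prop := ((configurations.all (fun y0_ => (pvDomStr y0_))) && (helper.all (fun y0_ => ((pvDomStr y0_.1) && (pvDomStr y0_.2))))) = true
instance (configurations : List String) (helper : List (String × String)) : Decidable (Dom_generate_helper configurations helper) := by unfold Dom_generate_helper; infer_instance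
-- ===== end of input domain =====

-- B replaces A's tail-recursive slice-per-step walk and if/elif chain by one iterative
-- loop over a literal name→path mapping (equivalence is about the RETURN value; both
-- Pythons also mutate `helper` in place in the same way).

-- ===== PORT A =====
-- recursion mirroring A: take configurations[0], write its path (unknown name raises:
-- outside Pre_, the state is returned unchanged), then recurse on configurations[1:] iff len > 1
def generate_helper_go (configurations : List String) (d : PySem.Dict String String) : PySem.Dict String String :=
  match configurations with
  | [] => d   -- configurations[0] raises IndexError in Python; excluded by Pre_
  | configuration :: rest =>
    let d' :=
      if configuration == "snmptrapd" then d.insert configuration "/etc/snmp/snmptrapd.conf"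
      else if configuration == "snmptrapd_users" then d.insert configuration "/var/lib/net-snmp/snmptrapd.conf"
      else if configuration == "ovirt_notifier" then d.insert configuration "/etc/ovirt-engine/notifier/notifier.conf.d/99-snmp.conf"
      else if configuration == "snmpd" then d.insert configuration "/etc/snmp/snmpd.conf"
      else d   -- Python raises NotImplementedError here; excluded by Pre_
    if rest.length > 0 then generate_helper_go rest d' else d'

def generate_helper (configurations : List String) (helper : List (String × String)) : List (String × String) :=
  (generate_helper_go configurations (PySem.Dict.mk helper)).items

-- ===== PORT B =====
def pvPaths : PySem.Dict String String := PySem.Dict.ofList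
  [("snmptrapd", "/etc/snmp/snmptrapd.conf"),
   ("snmptrapd_users", "/var/lib/net-snmp/snmptrapd.conf"),
   ("ovirt_notifier", "/etc/ovirt-engine/notifier/notifier.conf.d/99-snmp.conf"),
   ("snmpd", "/etc/snmp/snmpd.conf")]

def generate_helper_alt (configurations : List String) (helper : List (String × String)) : List (String × String) :=
  (configurations.foldl
    (fun d configuration =>
      match pvPaths.get? configuration with
      | some p => d.insert configuration p
      | none => d)   -- Python raises NotImplementedError here; excluded by Pre_
    (PySem.Dict.mk helper)).items

-- ===== PRECONDITION & SPEC =====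
-- Pre_ excludes exactly the inputs where A raises: the empty list (IndexError) and any
-- configuration name outside the four implemented ones (NotImplementedError).
def Pre_generate_helper (configurations : List String) (helper : List (String × String)) : Prop :=
  configurations ≠ [] ∧ ∀ c ∈ configurations,
    c = "snmptrapd" ∨ c = "snmptrapd_users" ∨ c = "ovirt_notifier" ∨ c = "snmpd"
instance (configurations : List String) (helper : List (String × String)) : Decidable (Pre_generate_helper configurations helper) := by unfold Pre_generate_helper; infer_instance

def pvWitness_generate_helper : List String × (List (String × String)) :=
  (["snmpd", "snmptrapd"], [("x", "y")])

def Spec_generate_helper (configurations : List String) (helper : List (String × String)) (out : List (String × String)) : Prop := out = generate_helper_alt configurations helper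
instance (configurations : List String) (helper : List (String × String)) (out : List (String × String)) : Decidable (Spec_generate_helper configurations helper out) := by unfold Spec_generate_helper; infer_instance

-- ===== CLAIM (what is proved, stated in full; the proofs are below) =====
def Claim_equal_generate_helper : Prop := ∀ (configurations : List String) (helper : List (String × String)), Dom_generate_helper configurations helper → Pre_generate_helper configurations helper → Spec_generate_helper configurations helper (generate_helper configurations helper)

-- ===== LEMMAS AND PROOFS =====

-- the two loop bodies write the same entry for any of the four known names
lemma step_eq (d : PySem.Dict String String) (c : String)
    (hc : c = "snmptrapd" ∨ c = "snmptrapd_users" ∨ c = "ovirt_notifier" ∨ c = "snmpd") :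
    (if c == "snmptrapd" then d.insert c "/etc/snmp/snmptrapd.conf"
     else if c == "snmptrapd_users" then d.insert c "/var/lib/net-snmp/snmptrapd.conf"
     else if c == "ovirt_notifier" then d.insert c "/etc/ovirt-engine/notifier/notifier.conf.d/99-snmp.conf"
     else if c == "snmpd" then d.insert c "/etc/snmp/snmpd.conf"
     else d)
    = (match pvPaths.get? c with
       | some p => d.insert c p
       | none => d) := by
  rcases hc with rfl | rfl | rfl | rfl <;> rfl

lemma go_eq_foldl (configurations : List String) (d : PySem.Dict String String)
    (hc : ∀ c ∈ configurations,
      c = "snmptrapd" ∨ c = "snmptrapd_users" ∨ c = "ovirt_notifier" ∨ c = "snmpd") :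
    generate_helper_go configurations d
      = configurations.foldl
          (fun d configuration =>
            match pvPaths.get? configuration with
            | some p => d.insert configuration p
            | none => d) d := by
  induction configurations generalizing d with
  | nil => rfl
  | cons c rest ih =>
    have hstep := step_eq d c (hc c (List.mem_cons_self ..))
    have hrest : ∀ x ∈ rest, x = "snmptrapd" ∨ x = "snmptrapd_users" ∨ x = "ovirt_notifier" ∨ x = "snmpd" :=
      fun x hx => hc x (List.mem_cons_of_mem _ hx)
    rw [generate_helper_go, List.foldl_cons, ← hstep]
    cases rest with
    | nil => simp
    | cons r rs => simp only [List.length_cons]; rw [if_pos (by omega)]; exact ih _ hrest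

-- ===== VERDICT (by name: the statement is the Claim_ definition above) =====
theorem generate_helper_spec : Claim_equal_generate_helper := by
  intro configurations helper _ hpre
  unfold Spec_generate_helper generate_helper generate_helper_alt
  rw [go_eq_foldl _ _ hpre.2]
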